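-- pv_equiv track=rewrite | github.com/10XGenomics/longranger | lib/python/longranger/sv/io.py | extract_sv_info
-- ===== SOURCE A (Python) =====
-- def extract_sv_info(filter_str, filter_names):
--     filter_fields = filter_str.split(';')
--     filter_vals = ['' for n in filter_names]
--     for f in filter_fields:
--         sub_filter_fields = f.split('=')
--         if len(sub_filter_fields) < 2:
--             continue
--         for idx, name in enumerate(filter_names):
--             if name == sub_filter_fields[0]:
--                 filter_vals[idx] = sub_filter_fields[1]
--                 if filter_vals[idx] == 'None':
--                     filter_vals[idx] = None
--     return filter_vals
-- ===== SOURCE B (Python) =====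
-- def extract_sv_info(filter_str, filter_names):
--     parsed = {}
--     for f in filter_str.split(';'):
--         parts = f.split('=')
--         if len(parts) >= 2:
--             parsed[parts[0]] = parts[1]
--     result = []
--     for name in filter_names:
--         v = parsed.get(name, '')
--         result.append(None if v == 'None' else v)
--     return result
-- ===== Notes on version B (the rewrite author's own statement) =====
-- stated objective: alternative
-- what changed: Replaces A's nested fields-by-names scan (updating a preallocated slot list in place) with one pass over the fields building a last-wins dict, followed by a single map over filter_names looking each name up with default '' and converting 'None' to None.
import Mathlib
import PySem

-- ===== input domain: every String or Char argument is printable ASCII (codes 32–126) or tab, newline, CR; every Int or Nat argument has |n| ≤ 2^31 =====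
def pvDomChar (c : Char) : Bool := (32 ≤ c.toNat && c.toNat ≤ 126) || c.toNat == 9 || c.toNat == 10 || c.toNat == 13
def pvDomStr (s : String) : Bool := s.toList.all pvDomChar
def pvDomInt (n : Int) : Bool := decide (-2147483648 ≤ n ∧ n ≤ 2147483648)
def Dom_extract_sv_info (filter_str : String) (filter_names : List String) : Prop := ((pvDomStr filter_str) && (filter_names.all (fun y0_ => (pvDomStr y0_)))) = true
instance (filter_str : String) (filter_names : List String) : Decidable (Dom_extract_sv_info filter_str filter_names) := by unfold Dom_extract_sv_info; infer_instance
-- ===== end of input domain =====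

-- B replaces A's nested fields-by-names in-place update with a last-wins dict built in one
-- pass over the fields followed by a single lookup pass over the names (objective: alternative).

-- s.split(sep) for a NONEMPTY separator (';' and '=' here): PySem.Str.split? is some in that case
def pvSplit (s sep : String) : List String := (PySem.Str.split? s sep).getD []

-- ===== PORT A =====
-- one field of the outer loop: the inner 'for idx, name in enumerate(filter_names)' scan
def pvStepA (filter_names : List String) (vals : List (Option String)) (f : String) :
    List (Option String) :=
  let sub := pvSplit f "="
  if sub.length < 2 then vals
  else
    (PySem.List.enumerate filter_names).foldl (fun vals p =>
      if p.2 == PySem.List.pyGetD sub 0 "" then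
        -- filter_vals[idx] = sub_filter_fields[1]
        let vals1 := PySem.List.pySetD vals p.1 (some (PySem.List.pyGetD sub 1 ""))
        -- if filter_vals[idx] == 'None': filter_vals[idx] = None
        if PySem.List.pyGetD sub 1 "" == "None" then PySem.List.pySetD vals1 p.1 none
        else vals1
      else vals) vals

def extract_sv_info (filter_str : String) (filter_names : List String) : List (Option String) :=
  (pvSplit filter_str ";").foldl (pvStepA filter_names)
    (filter_names.map (fun _ => some ""))

-- ===== PORT B =====
def pvConv (v : String) : Option String := if v == "None" then none else some v

def pvStepB (d : PySem.Dict String String) (f : String) : PySem.Dict String String :=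
  let parts := pvSplit f "="
  if parts.length ≥ 2 then
    d.insert (PySem.List.pyGetD parts 0 "") (PySem.List.pyGetD parts 1 "")
  else d

def extract_sv_info_alt (filter_str : String) (filter_names : List String) :
    List (Option String) :=
  let parsed := (pvSplit filter_str ";").foldl pvStepB PySem.Dict.empty
  filter_names.map (fun name => pvConv (parsed.getD name ""))

-- ===== PRECONDITION & SPEC =====
def Spec_extract_sv_info (filter_str : String) (filter_names : List String) (out : List (Option String)) : Prop := out = extract_sv_info_alt filter_str filter_names
instance (filter_str : String) (filter_names : List String) (out : List (Option String)) : Decidable (Spec_extract_sv_info filter_str filter_names out) := by unfold Spec_extract_sv_info; infer_instance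

-- ===== CLAIM (what is proved, stated in full; the proofs are below) =====
def Claim_equal_extract_sv_info : Prop := ∀ (filter_str : String) (filter_names : List String), Dom_extract_sv_info filter_str filter_names → Spec_extract_sv_info filter_str filter_names (extract_sv_info filter_str filter_names)

-- ===== LEMMAS AND PROOFS =====

-- setting at the junction of an append
theorem pv_set_append_len {α : Type} (pre : List α) (x y : α) (t : List α) :
    (pre ++ x :: t).set pre.length y = pre ++ y :: t := by
  induction pre with
  | nil => rfl
  | cons a pre ih => simp [ih]

-- the inner enumerate-fold rewrites a map-shaped state pointwise
theorem pv_inner (k v : String) (names : List String) :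
    ∀ (m : Nat) (pre : List (Option String)) (g : String → Option String),
      pre.length = m →
      (PySem.List.enumerate names (m : Int)).foldl (fun vals p =>
          if p.2 == k then
            let vals1 := PySem.List.pySetD vals p.1 (some v)
            if v == "None" then PySem.List.pySetD vals1 p.1 none else vals1
          else vals) (pre ++ names.map g)
        = pre ++ names.map (fun n => if n == k then pvConv v else g n) := by
  induction names with
  | nil => intro m pre g h; simp
  | cons n rest ih =>
    intro m pre g h
    rw [PySem.List.enumerate_cons]
    simp only [List.foldl_cons, List.map_cons]
    have hset : ∀ (x w : Option String),
        PySem.List.pySetD (pre ++ x :: rest.map g) (m : Int) w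
          = pre ++ w :: rest.map g := by
      intro x w
      rw [PySem.List.pySetD_natCast, ← h, pv_set_append_len]
    have hstep : (if n == k then
          let vals1 := PySem.List.pySetD (pre ++ g n :: rest.map g) (m : Int) (some v)
          if v == "None" then PySem.List.pySetD vals1 (m : Int) none else vals1
        else (pre ++ g n :: rest.map g))
        = pre ++ (if n == k then pvConv v else g n) :: rest.map g := by
      by_cases hk : n == k
      · simp only [hk, if_true, pvConv]
        by_cases hv : v == "None"
        · simp [hv, hset]
        · simp [hv, hset]
      · simp [hk]
    rw [hstep]
    have := ih (m + 1) (pre ++ [if n == k then pvConv v else g n]) g (by simp [h])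
    push_cast at this ⊢
    simpa using this

-- one outer step preserves the "vals = names.map (pvConv ∘ lookup)" invariant
theorem pv_step (names : List String) (d : PySem.Dict String String) (f : String) :
    pvStepA names (names.map (fun n => pvConv (d.getD n ""))) f
      = names.map (fun n => pvConv ((pvStepB d f).getD n "")) := by
  unfold pvStepA pvStepB
  by_cases hlen : (pvSplit f "=").length < 2
  · rw [if_pos hlen, if_neg (by omega)]
  · rw [if_neg hlen, if_pos (by omega)]
    have := pv_inner (PySem.List.pyGetD (pvSplit f "=") 0 "")
      (PySem.List.pyGetD (pvSplit f "=") 1 "") names 0 []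
      (fun n => pvConv (d.getD n "")) rfl
    simp only [List.nil_append, Nat.cast_zero] at this
    rw [this]
    apply List.map_congr_left
    intro n _
    rw [PySem.Dict.getD_insert]
    by_cases hk : n = PySem.List.pyGetD (pvSplit f "=") 0 ""
    · simp [hk]
    · simp [hk]

theorem pv_main (names : List String) :
    ∀ (fields : List String) (d : PySem.Dict String String),
      fields.foldl (pvStepA names) (names.map (fun n => pvConv (d.getD n "")))
        = names.map (fun n => pvConv ((fields.foldl pvStepB d).getD n "")) := by
  intro fields
  induction fields with
  | nil => intro d; rfl
  | cons f rest ih =>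
    intro d
    simp only [List.foldl_cons, pv_step]
    exact ih (pvStepB d f)

-- ===== VERDICT (by name: the statement is the Claim_ definition above) =====
theorem extract_sv_info_spec : Claim_equal_extract_sv_info := by
  intro fs names _
  unfold Spec_extract_sv_info extract_sv_info extract_sv_info_alt
  have hinit : names.map (fun _ => some "") =
      names.map (fun n => pvConv ((PySem.Dict.empty (κ := String) (ν := String)).getD n "")) := by
    apply List.map_congr_left; intro n _; rfl
  rw [hinit]
  exact pv_main names (pvSplit fs ";") PySem.Dict.empty
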